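-- pv_equiv track=rewrite | github.com/josephsenior/Grinta-Agent | evaluation/benchmarks/logic_reasoning/run_infer.py | get_test_result
-- ===== SOURCE A (Python) =====
-- def get_choice(answer_str):
--     choices = [
--         "A",
--         "B",
--         "C",
--         "D",
--         "E",
--         "F",
--         "G",
--         "H",
--         "A)",
--         "B)",
--         "C)",
--         "D)",
--         "E)",
--         "F)",
--         "G)",
--         "H)",
--         "A.",
--         "B.",
--         "C.",
--         "D.",
--         "E.",
--         "F.",
--         "G.",
--         "H.",
--     ]
--     for c in choices:
--         if answer_str.startswith(c):
--             return c.replace(")", "")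
--     if answer_str.startswith(":"):
--         return answer_str.replace(":", "").replace(".", "").strip()
--     return None
--
-- def get_test_result(model_answer: str, ground_truth: str) -> dict[str, bool]:
--     gold_answer = ground_truth.replace("(", "").replace(")", "").strip()
--     answer_str = model_answer if model_answer is not None else ""
--     prediction = get_choice(answer_str)
--     if prediction is None:
--         indicators = [
--             "the correct option is",
--             "the correct answer is",
--             "The correct answer is",
--             "The correct option is",
--             "the answer is",
--         ]
--         for indicator in indicators:
--             if answer_str.find(indicator) >= 0:
--                 answer_str = answer_str.split(indicator)[1].strip()
--                 prediction = get_choice(answer_str)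
--                 break
--     isTrue = prediction == gold_answer
--     return {"result": isTrue}
-- ===== SOURCE B (Python) =====
-- INDICATORS = [
--     "the correct option is",
--     "the correct answer is",
--     "The correct answer is",
--     "The correct option is",
--     "the answer is",
-- ]
--
--
-- def get_choice(answer_str):
--     # The suffixed entries ("A)", "A.", ...) in A's table are unreachable:
--     # the plain letter always matches first, so a first-character test suffices.
--     first = answer_str[:1]
--     if first and first in "ABCDEFGH":
--         return first
--     if answer_str.startswith(":"):
--         return answer_str.replace(":", "").replace(".", "").strip()
--     return None
--
--
-- def get_test_result(model_answer: str, ground_truth: str) -> dict[str, bool]: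
--     gold_answer = ground_truth.replace("(", "").replace(")", "").strip()
--     answer_str = model_answer if model_answer is not None else ""
--     prediction = get_choice(answer_str)
--     if prediction is None:
--         hit = next((i for i in INDICATORS if i in answer_str), None)
--         if hit is not None:
--             prediction = get_choice(answer_str.split(hit)[1].strip())
--     return {"result": prediction == gold_answer}
-- ===== Notes on version B (the rewrite author's own statement) =====
-- stated objective: simpler
-- what changed: get_choice's 24-entry prefix-scan loop is replaced by a single first-character test (the suffixed entries are unreachable), and A's indicator for-loop with find/break is replaced by a next() search for the first contained indicator followed by one split.
import Mathlib
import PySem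

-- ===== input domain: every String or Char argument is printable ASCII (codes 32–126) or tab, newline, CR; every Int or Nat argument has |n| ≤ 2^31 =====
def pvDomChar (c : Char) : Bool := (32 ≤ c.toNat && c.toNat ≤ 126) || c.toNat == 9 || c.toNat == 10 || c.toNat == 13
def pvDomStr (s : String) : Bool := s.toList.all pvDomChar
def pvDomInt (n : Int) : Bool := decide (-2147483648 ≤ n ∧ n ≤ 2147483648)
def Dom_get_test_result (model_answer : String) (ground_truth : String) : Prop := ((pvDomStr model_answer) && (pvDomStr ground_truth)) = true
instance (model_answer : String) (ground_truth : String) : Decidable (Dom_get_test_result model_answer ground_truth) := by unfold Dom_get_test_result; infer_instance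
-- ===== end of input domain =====

-- B replaces A's 24-entry prefix-scan in get_choice by a single first-character test
-- (the suffixed table entries are unreachable) and A's indicator for-loop by a
-- find-first-indicator search followed by one split; objective: simpler.

-- ===== PORT A =====
def pvChoices : List String :=
  ["A", "B", "C", "D", "E", "F", "G", "H",
   "A)", "B)", "C)", "D)", "E)", "F)", "G)", "H)",
   "A.", "B.", "C.", "D.", "E.", "F.", "G.", "H."]

def pvChoiceLoop (answer_str : String) : List String → Option String
  | [] => none
  | c :: rest =>
    if PySem.Str.startswith answer_str c then some (PySem.Str.replace c ")" "")
    else pvChoiceLoop answer_str rest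

def pvGetChoice (answer_str : String) : Option String :=
  match pvChoiceLoop answer_str pvChoices with
  | some r => some r
  | none =>
    if PySem.Str.startswith answer_str ":" then
      some (PySem.Str.strip (PySem.Str.replace (PySem.Str.replace answer_str ":" "") "." ""))
    else none

def pvIndicators : List String :=
  ["the correct option is", "the correct answer is", "The correct answer is",
   "The correct option is", "the answer is"]

-- `answer_str.split(indicator)[1]`: the guard `find ≥ 0` means the (nonempty) indicator
-- occurs, so the split has at least two parts and Python's `[1]` never raises; it is
-- ported with getD (exact on every input the branch reaches).
def pvIndLoop (answer_str : String) : List String → Option String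
  | [] => none
  | ind :: rest =>
    if 0 ≤ PySem.Str.find answer_str ind then
      pvGetChoice (PySem.Str.strip (((PySem.Str.split? answer_str ind).getD []).getD 1 ""))
    else pvIndLoop answer_str rest

def get_test_result (model_answer : String) (ground_truth : String) : List (String × Bool) :=
  let gold_answer := PySem.Str.strip (PySem.Str.replace (PySem.Str.replace ground_truth "(" "") ")" "")
  let answer_str := model_answer
  let prediction := pvGetChoice answer_str
  let prediction :=
    match prediction with
    | some p => some p
    | none => pvIndLoop answer_str pvIndicators
  let isTrue := match prediction with | some p => p == gold_answer | none => false
  [("result", isTrue)]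

-- ===== PORT B =====
def pvIndicatorsAlt : List String :=
  ["the correct option is", "the correct answer is", "The correct answer is",
   "The correct option is", "the answer is"]

def pvGetChoiceAlt (answer_str : String) : Option String :=
  let first := PySem.Str.slice answer_str none (some 1)
  if first ≠ "" ∧ PySem.Str.isIn first "ABCDEFGH" = true then some first
  else if PySem.Str.startswith answer_str ":" then
    some (PySem.Str.strip (PySem.Str.replace (PySem.Str.replace answer_str ":" "") "." ""))
  else none

def get_test_result_alt (model_answer : String) (ground_truth : String) : List (String × Bool) :=
  let gold_answer := PySem.Str.strip (PySem.Str.replace (PySem.Str.replace ground_truth "(" "") ")" "")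
  let answer_str := model_answer
  let prediction :=
    match pvGetChoiceAlt answer_str with
    | some p => some p
    | none =>
      match pvIndicatorsAlt.find? (fun i => PySem.Str.isIn i answer_str) with
      | some hit =>
        -- `answer_str.split(hit)[1]`: hit occurs in answer_str, so index 1 exists
        pvGetChoiceAlt (PySem.Str.strip (((PySem.Str.split? answer_str hit).getD []).getD 1 ""))
      | none => none
  [("result", match prediction with | some p => p == gold_answer | none => false)]

-- ===== PRECONDITION & SPEC =====
def Spec_get_test_result (model_answer : String) (ground_truth : String) (out : List (String × Bool)) : Prop := out = get_test_result_alt model_answer ground_truth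
instance (model_answer : String) (ground_truth : String) (out : List (String × Bool)) : Decidable (Spec_get_test_result model_answer ground_truth out) := by unfold Spec_get_test_result; infer_instance

-- ===== CLAIM (what is proved, stated in full; the proofs are below) =====
def Claim_equal_get_test_result : Prop := ∀ (model_answer : String) (ground_truth : String), Dom_get_test_result model_answer ground_truth → Spec_get_test_result model_answer ground_truth (get_test_result model_answer ground_truth)

-- ===== LEMMAS AND PROOFS =====

theorem pvChoice_eq (s : String) : pvGetChoice s = pvGetChoiceAlt s := by
  cases h : s.toList with
  | nil =>
    have hs : s = "" := String.toList_inj.mp (by simpa using h)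
    subst hs; decide
  | cons c r =>
    have hf : PySem.Str.slice s none (some 1) = String.ofList [c] := by
      apply String.toList_inj.mp
      simp [PySem.Chars.slice_eq_listSlice, PySem.List.slice_to, h]
    by_cases hc : c = 'A' ∨ c = 'B' ∨ c = 'C' ∨ c = 'D' ∨ c = 'E' ∨ c = 'F' ∨ c = 'G' ∨ c = 'H'
    · obtain rfl | rfl | rfl | rfl | rfl | rfl | rfl | rfl := hc <;>
        simp [pvGetChoice, pvGetChoiceAlt, pvChoiceLoop, pvChoices, hf,
              PySem.Str.startswith_eq, PySem.Chars.startswith, List.isPrefixOf, h] <;>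
        decide
    · push Not at hc
      obtain ⟨h1, h2, h3, h4, h5, h6, h7, h8⟩ := hc
      have hmem : PySem.Chars.isIn [c] ['A', 'B', 'C', 'D', 'E', 'F', 'G', 'H'] = false := by
        rw [PySem.Chars.isIn_eq_false_iff]
        intro hinf
        have hc' := hinf.subset (List.mem_singleton.mpr rfl)
        simp at hc'
        tauto
      simp [pvGetChoice, pvGetChoiceAlt, pvChoiceLoop, pvChoices, hf,
            PySem.Str.startswith_eq, PySem.Chars.startswith, List.isPrefixOf, h, hmem,
            Ne.symm h1, Ne.symm h2, Ne.symm h3, Ne.symm h4,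
            Ne.symm h5, Ne.symm h6, Ne.symm h7, Ne.symm h8]

theorem pvInd_eq (s : String) (l : List String) :
    pvIndLoop s l =
      match l.find? (fun i => PySem.Str.isIn i s) with
      | some hit => pvGetChoiceAlt (PySem.Str.strip (((PySem.Str.split? s hit).getD []).getD 1 ""))
      | none => none := by
  induction l with
  | nil => simp [pvIndLoop]
  | cons ind rest ih =>
    rw [pvIndLoop]
    by_cases hin : PySem.Str.isIn ind s = true
    · rw [if_pos (by rw [PySem.Str.find_nonneg_iff, ← PySem.Str.isIn_iff_infix]; exact hin)]
      simp only [PySem.Str.isIn_eq] at hin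
      simp [List.find?, hin, pvChoice_eq]
    · rw [if_neg (by rw [PySem.Str.find_nonneg_iff, ← PySem.Str.isIn_iff_infix]; exact hin)]
      simp only [PySem.Str.isIn_eq, Bool.not_eq_true] at hin
      rw [ih]
      simp [List.find?, hin]

-- ===== VERDICT (by name: the statement is the Claim_ definition above) =====
theorem get_test_result_spec : Claim_equal_get_test_result := by
  intro ma gt _
  unfold Spec_get_test_result get_test_result get_test_result_alt
  simp only [pvChoice_eq, pvInd_eq]
  rfl
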